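-- pv_equiv track=rewrite | github.com/d14405011-sudo/2026-python | weeks/week-10/solutions/1114405011-0429/q10268-easy.py | solve
-- ===== SOURCE A (Python) =====
-- from typing import List, Optional
--
-- LIMIT_MSG = "More than 63 trials needed."
--
-- def least_moves(eggs: int, floors: int) -> Optional[int]:
--     if floors <= 0:
--         return 0
--
--     reachable = [0] * (eggs + 1)
--
--     for moves in range(1, 64):
--         for e in range(eggs, 0, -1):
--             reachable[e] = reachable[e] + reachable[e - 1] + 1
--             if reachable[e] > floors:
--                 reachable[e] = floors
--         if reachable[eggs] >= floors:
--             return moves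
--
--     return None
--
-- def solve(raw: str) -> str:
--     out: List[str] = []
--
--     for line in raw.strip().splitlines():
--         line = line.strip()
--         if not line:
--             continue
--         k, n = map(int, line.split())
--         if k == 0:
--             break
--
--         ans = least_moves(k, n)
--         if ans is None:
--             out.append(LIMIT_MSG)
--         else:
--             out.append(str(ans))
--
--     return "\n".join(out)
-- ===== SOURCE B (Python) =====
-- from typing import List, Optional
--
-- LIMIT_MSG = "More than 63 trials needed."
--
-- def least_moves(eggs: int, floors: int) -> Optional[int]:
--     # closed form: m moves with `eggs` eggs distinguish sum_{i=1..eggs} C(m,i) floors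
--     if floors <= 0:
--         return 0
--     for moves in range(1, 64):
--         c = 1          # C(moves, i), maintained incrementally
--         s = 0          # partial binomial sum
--         for i in range(1, eggs + 1):
--             c = c * (moves - i + 1) // i
--             if c == 0:
--                 break
--             s += c
--             if s >= floors:
--                 break
--         if s >= floors:
--             return moves
--     return None
--
-- def solve(raw: str) -> str:
--     queries = []
--     for line in raw.strip().splitlines():
--         line = line.strip()
--         if not line:
--             continue
--         k, n = map(int, line.split())
--         if k == 0:
--             break
--         queries.append((k, n))
--     return "\n".join(LIMIT_MSG if (a := least_moves(k, n)) is None else str(a)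
--                      for k, n in queries)
-- ===== Notes on version B (the rewrite author's own statement) =====
-- stated objective: alternative
-- what changed: least_moves now finds the first m with sum_{i=1..eggs} C(m,i) >= floors via an incrementally maintained binomial coefficient (early exit once the sum reaches floors or the coefficient hits 0) instead of A's per-egg reachability DP array; solve is split into a parse-all-queries phase followed by a render phase.
import Mathlib
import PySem

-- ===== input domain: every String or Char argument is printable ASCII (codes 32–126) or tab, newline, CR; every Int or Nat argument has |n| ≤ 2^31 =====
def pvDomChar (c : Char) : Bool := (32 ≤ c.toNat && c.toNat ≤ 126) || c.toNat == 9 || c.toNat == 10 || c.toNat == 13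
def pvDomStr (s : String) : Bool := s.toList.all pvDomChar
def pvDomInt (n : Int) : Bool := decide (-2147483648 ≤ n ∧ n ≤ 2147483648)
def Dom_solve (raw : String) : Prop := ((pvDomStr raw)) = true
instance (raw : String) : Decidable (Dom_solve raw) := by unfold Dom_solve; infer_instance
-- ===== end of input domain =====

-- B computes least_moves from the binomial-sum closed form (first m with sum_{i=1..eggs} C(m,i) >= floors,
-- maintained incrementally) instead of A's per-egg reachability DP array, and splits solve into a
-- parse-then-render pipeline; objective: alternative algorithm (faster per query for many eggs).


-- ===== PORT A =====
def LIMIT_MSG : String := "More than 63 trials needed."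

-- inner loop: for e in range(eggs, 0, -1)
def lmInner (floors : Int) : List Int → Nat → List Int
  | reach, 0 => reach
  | reach, e + 1 =>
    -- reachable[e] = reachable[e] + reachable[e-1] + 1 (indices in range under Pre_solve)
    let v := reach.getD (e + 1) 0 + reach.getD e 0 + 1
    let v := if v > floors then floors else v
    lmInner floors (reach.set (e + 1) v) e

-- outer loop: for moves in range(1, 64), fuel counts the remaining moves values
def lmLoop (eggs : Nat) (floors : Int) : List Int → Int → Nat → Option Int
  | _, _, 0 => none
  | reach, m, fuel + 1 =>
    let r := lmInner floors reach eggs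
    if floors ≤ r.getD eggs 0 then some m
    else lmLoop eggs floors r (m + 1) fuel

def least_moves (eggs floors : Int) : Option Int :=
  if floors ≤ 0 then some 0
  else lmLoop eggs.toNat floors (List.replicate (eggs + 1).toNat 0) 1 63

def solveLines : List String → List String → List String
  | [], out => out
  | line :: rest, out =>
    let l := PySem.Str.strip line
    if l = "" then solveLines rest out
    else
      match (PySem.Str.split₀ l).map PySem.Int.ofStr? with
      | [some k, some n] =>
        if k = 0 then out
        else
          match least_moves k n with
          | none => solveLines rest (out ++ [LIMIT_MSG])
          | some a => solveLines rest (out ++ [PySem.Int.toStr a])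
      | _ => out   -- Python raises ValueError here; such inputs are outside Pre_solve

def solve (raw : String) : String :=
  PySem.Str.join "\n" (solveLines (PySem.Str.splitlines (PySem.Str.strip raw)) [])

-- ===== PORT B =====
-- inner loop: i in range(1, eggs+1); c = C(moves, i) maintained incrementally, s = partial sum
def lmAltInner (m floors : Int) : Int → Int → Int → Nat → Int
  | _, s, _, 0 => s
  | c, s, i, fuel + 1 =>
    let c := PySem.Int.floordiv (c * (m - i + 1)) i
    if c = 0 then s
    else
      let s := s + c
      if floors ≤ s then s
      else lmAltInner m floors c s (i + 1) fuel

def lmAltLoop (eggs floors : Int) : Int → Nat → Option Int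
  | _, 0 => none
  | m, fuel + 1 =>
    let s := lmAltInner m floors 1 0 1 eggs.toNat
    if floors ≤ s then some m else lmAltLoop eggs floors (m + 1) fuel

def least_moves_alt (eggs floors : Int) : Option Int :=
  if floors ≤ 0 then some 0
  else lmAltLoop eggs floors 1 63

def parseQueries : List String → List (Int × Int) → List (Int × Int)
  | [], qs => qs
  | line :: rest, qs =>
    let l := PySem.Str.strip line
    if l = "" then parseQueries rest qs
    else
      match (PySem.Str.split₀ l).map PySem.Int.ofStr? with
      | [some k, some n] =>
        if k = 0 then qs else parseQueries rest (qs ++ [(k, n)])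
      | _ => qs   -- Python raises ValueError here; such inputs are outside Pre_solve

def renderAlt (q : Int × Int) : String :=
  match least_moves_alt q.1 q.2 with
  | none => LIMIT_MSG
  | some a => PySem.Int.toStr a

def solve_alt (raw : String) : String :=
  PySem.Str.join "\n"
    ((parseQueries (PySem.Str.splitlines (PySem.Str.strip raw)) []).map renderAlt)

-- ===== PRECONDITION & SPEC =====
-- token list of one input line, as Python parses it: line.split() with each token through int()
def pvToks (line : String) : List (Option Int) :=
  (PySem.Str.split₀ (PySem.Str.strip line)).map PySem.Int.ofStr?
-- line is exactly two int() tokens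
def pvWF (line : String) : Bool :=
  match pvToks line with
  | [some _, some _] => true
  | _ => false
-- line is a well-formed 0-egg terminator
def pvStop (line : String) : Bool :=
  match pvToks line with
  | [some k, some _] => decide (k = 0)
  | _ => false
-- line has eggs < 0 and floors > 0
def pvNeg (line : String) : Bool :=
  match pvToks line with
  | [some k, some n] => decide (k < 0 ∧ 0 < n)
  | _ => false
-- the lines Python actually processes: non-blank lines before the first 0-egg terminator
def pvLines (raw : String) : List String :=
  ((PySem.Str.splitlines (PySem.Str.strip raw)).filter
      (fun l => !(PySem.Str.strip l == ""))).takeWhile (fun l => !pvStop l)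

-- Pre_solve excludes exactly the inputs on which Python A raises: a processed line that is not exactly
-- two int() tokens (ValueError), or one with eggs < 0 and floors > 0 (IndexError).
def Pre_solve (raw : String) : Prop :=
  ∀ l ∈ pvLines raw, pvWF l = true ∧ pvNeg l = false
instance (raw : String) : Decidable (Pre_solve raw) := by unfold Pre_solve; infer_instance
def pvWitness_solve : String := "2 10\n3 100\n1 0\n0 0"

def Spec_solve (raw : String) (out : String) : Prop := out = solve_alt raw
instance (raw : String) (out : String) : Decidable (Spec_solve raw out) := by unfold Spec_solve; infer_instance

-- ===== CLAIM (what is proved, stated in full; the proofs are below) =====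
def Claim_equal_solve : Prop := ∀ (raw : String), Dom_solve raw → Pre_solve raw → Spec_solve raw (solve raw)
-- ===== LEMMAS AND PROOFS =====

-- proof-side restatement of Pre_solve as the scan A's loop performs
def preLines : List String → Bool
  | [] => true
  | line :: rest =>
    let l := PySem.Str.strip line
    if l = "" then preLines rest
    else
      match (PySem.Str.split₀ l).map PySem.Int.ofStr? with
      | [some k, some n] =>
        if k = 0 then true
        else (decide ¬(k < 0 ∧ 0 < n)) && preLines rest
      | _ => false

theorem pre_bridge (ls : List String)
    (hyp : ∀ l ∈ (ls.filter (fun l => !(PySem.Str.strip l == ""))).takeWhile (fun l => !pvStop l),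
      pvWF l = true ∧ pvNeg l = false) : preLines ls = true := by
  induction ls with
  | nil => rfl
  | cons line rest ih =>
    simp only [preLines]
    by_cases hE : PySem.Str.strip line = ""
    · simp only [if_pos hE]
      simp only [List.filter_cons, hE] at hyp
      exact ih hyp
    · simp only [if_neg hE]
      have ht : (!(PySem.Str.strip line == "")) = true := by simp [hE]
      simp only [List.filter_cons, ht, if_true] at hyp
      by_cases hS : pvStop line = true
      · -- a well-formed 0-egg terminator: preLines is true whatever follows
        unfold pvStop pvToks at hS
        generalize hts : (PySem.Str.split₀ (PySem.Str.strip line)).map PySem.Int.ofStr? = ts at hS ⊢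
        rcases ts with _ | ⟨o1, ts⟩
        · simp at hS
        rcases o1 with _ | k
        · simp at hS
        rcases ts with _ | ⟨o2, ts⟩
        · simp at hS
        rcases o2 with _ | n
        · simp at hS
        rcases ts with _ | ⟨o3, ts⟩
        · simp [of_decide_eq_true hS]
        · simp at hS
      · have hnS : (!pvStop line) = true := by simp [hS]
        simp only [List.takeWhile_cons, hnS, if_true] at hyp
        obtain ⟨hwf, hneg⟩ := hyp line (List.mem_cons_self ..)
        have hpre := ih (fun x hx => hyp x (List.mem_cons_of_mem _ hx))
        unfold pvWF pvToks at hwf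
        unfold pvNeg pvToks at hneg
        unfold pvStop pvToks at hS
        generalize hts : (PySem.Str.split₀ (PySem.Str.strip line)).map PySem.Int.ofStr? = ts
          at hwf hneg hS ⊢
        rcases ts with _ | ⟨o1, ts⟩
        · simp at hwf
        rcases o1 with _ | k
        · simp at hwf
        rcases ts with _ | ⟨o2, ts⟩
        · simp at hwf
        rcases o2 with _ | n
        · simp at hwf
        rcases ts with _ | ⟨o3, ts⟩
        · change (if k = 0 then true else decide ¬(k < 0 ∧ 0 < n) && preLines rest) = true
          have hk0 : ¬ k = 0 := by
            intro hk
            apply hS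
            change decide (k = 0) = true
            simp [hk]
          rw [if_neg hk0, Bool.and_eq_true]
          have hneg' : decide (k < 0 ∧ 0 < n) = false := hneg
          exact ⟨by simp at hneg' ⊢; omega, hpre⟩
        · simp at hwf

def binomSum (m e : Nat) : Nat := ∑ i ∈ Finset.Icc 1 e, m.choose i

theorem binomSum_zero (m : Nat) : binomSum m 0 = 0 := by simp [binomSum]

theorem binomSum_succ (m e : Nat) : binomSum m (e + 1) = binomSum m e + m.choose (e + 1) := by
  unfold binomSum
  rw [← Finset.sum_Icc_succ_top (by omega : 1 ≤ e + 1)]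

theorem binomSum_zero_left (e : Nat) : binomSum 0 e = 0 := by
  induction e with
  | zero => simp [binomSum]
  | succ e ih => rw [binomSum_succ, ih, Nat.choose_eq_zero_of_lt (by omega)]

theorem binomSum_mono (m : Nat) {e e' : Nat} (h : e ≤ e') : binomSum m e ≤ binomSum m e' := by
  induction e' with
  | zero => have h0 : e = 0 := by omega
            simp [h0]
  | succ e' ih =>
    rcases Nat.lt_or_ge e (e' + 1) with h' | h'
    · exact le_trans (ih (by omega)) (by rw [binomSum_succ]; omega)
    · have h0 : e = e' + 1 := by omega
      simp [h0]

theorem binomSum_stable (m : Nat) {j e : Nat} (hm : m ≤ j) (h : j ≤ e) :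
    binomSum m e = binomSum m j := by
  induction e with
  | zero => have h0 : j = 0 := by omega
            simp [h0]
  | succ e ih =>
    rcases Nat.lt_or_ge j (e + 1) with h' | h'
    · rw [binomSum_succ, Nat.choose_eq_zero_of_lt (by omega), ih (by omega)]
      omega
    · have h0 : j = e + 1 := by omega
      simp [h0]

theorem binomSum_pascal (m e : Nat) :
    binomSum (m + 1) (e + 1) = binomSum m (e + 1) + binomSum m e + 1 := by
  induction e with
  | zero =>
    simp [binomSum_succ, binomSum_zero, Nat.choose_one_right]
  | succ e ih =>
    rw [binomSum_succ (m + 1), ih, Nat.choose_succ_succ m (e + 1), binomSum_succ m (e + 1),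
      binomSum_succ m e]
    simp only [Nat.succ_eq_add_one]
    omega

theorem getD_map_range (f : Nat → Int) {j n : Nat} (h : j < n) :
    (((List.range n).map f).getD j 0) = f j := by
  rw [List.getD_eq_getElem?_getD]
  simp [h]

theorem lmInner_arr (floors : Int) (hf : 1 ≤ floors) (m n : Nat) :
    ∀ e, e ≤ n →
      lmInner floors
        ((List.range (n + 1)).map
          (fun j => if j ≤ e then min floors ((binomSum m j : Nat) : Int)
                    else min floors ((binomSum (m + 1) j : Nat) : Int))) e
      = (List.range (n + 1)).map (fun j => min floors ((binomSum (m + 1) j : Nat) : Int)) := by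
  intro e
  induction e with
  | zero =>
    intro _
    simp only [lmInner]
    apply List.map_congr_left
    intro j hj
    by_cases hj0 : j = 0
    · subst hj0; simp [binomSum_zero]
    · rw [if_neg (by omega)]
  | succ e ih =>
    intro he
    simp only [lmInner]
    have hg1 : (((List.range (n + 1)).map
        (fun j => if j ≤ e + 1 then min floors ((binomSum m j : Nat) : Int)
                  else min floors ((binomSum (m + 1) j : Nat) : Int))).getD (e + 1) 0)
        = min floors ((binomSum m (e + 1) : Nat) : Int) := by
      rw [getD_map_range _ (by omega)]; rw [if_pos (by omega)]
    have hg2 : (((List.range (n + 1)).map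
        (fun j => if j ≤ e + 1 then min floors ((binomSum m j : Nat) : Int)
                  else min floors ((binomSum (m + 1) j : Nat) : Int))).getD e 0)
        = min floors ((binomSum m e : Nat) : Int) := by
      rw [getD_map_range _ (by omega)]; rw [if_pos (by omega)]
    rw [hg1, hg2]
    have hv : (if min floors ((binomSum m (e + 1) : Nat) : Int) + min floors ((binomSum m e : Nat) : Int) + 1 > floors
               then floors
               else min floors ((binomSum m (e + 1) : Nat) : Int) + min floors ((binomSum m e : Nat) : Int) + 1)
        = min floors ((binomSum (m + 1) (e + 1) : Nat) : Int) := by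
      have hp : (binomSum (m + 1) (e + 1) : Int) = (binomSum m (e + 1) : Int) + (binomSum m e : Int) + 1 := by
        rw [binomSum_pascal]; push_cast; ring
      rw [hp]
      have h1 : (0:Int) ≤ (binomSum m (e + 1) : Int) := by positivity
      have h2 : (0:Int) ≤ (binomSum m e : Int) := by positivity
      split_ifs <;> omega
    rw [hv]
    have hset : (((List.range (n + 1)).map
        (fun j => if j ≤ e + 1 then min floors ((binomSum m j : Nat) : Int)
                  else min floors ((binomSum (m + 1) j : Nat) : Int))).set (e + 1)
          (min floors ((binomSum (m + 1) (e + 1) : Nat) : Int)))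
        = (List.range (n + 1)).map
          (fun j => if j ≤ e then min floors ((binomSum m j : Nat) : Int)
                    else min floors ((binomSum (m + 1) j : Nat) : Int)) := by
      apply List.ext_getElem
      · simp
      · intro i h1 h2
        simp only [List.length_set, List.length_map, List.length_range] at h1 h2
        rw [List.getElem_set]
        rcases eq_or_ne (e + 1) i with rfl | hne
        · rw [if_pos rfl, List.getElem_map, List.getElem_range, if_neg (by omega)]
        · rw [if_neg hne]
          simp only [List.getElem_map, List.getElem_range]
          by_cases hc : i ≤ e
          · rw [if_pos (by omega), if_pos hc]
          · rw [if_neg (by omega), if_neg hc]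
    rw [hset]
    exact ih (by omega)

theorem lmAltInner_iff (mN : Nat) (floors : Int) :
    ∀ (fuel j : Nat),
      (floors ≤ lmAltInner (mN : Int) floors ((mN.choose j : Nat) : Int) ((binomSum mN j : Nat) : Int) ((j : Int) + 1) fuel)
      ↔ (floors ≤ ((binomSum mN (j + fuel) : Nat) : Int)) := by
  intro fuel
  induction fuel with
  | zero => intro j; simp [lmAltInner]
  | succ fuel ih =>
    intro j
    simp only [lmAltInner]
    have hsub : (mN : Int) - ((j : Int) + 1) + 1 = (mN : Int) - (j : Int) := by ring
    rw [hsub]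
    rcases Nat.lt_or_ge j mN with hj | hj
    · -- j < mN : the incremental step computes C(mN, j+1) exactly
      have hcast : ((mN.choose j : Nat) : Int) * ((mN : Int) - (j : Int))
          = ((mN.choose (j + 1) * (j + 1) : Nat) : Int) := by
        rw [Nat.choose_succ_right_eq]
        push_cast [Nat.cast_sub (by omega : j ≤ mN)]
        ring
      have hc : PySem.Int.floordiv (((mN.choose j : Nat) : Int) * ((mN : Int) - (j : Int))) ((j : Int) + 1)
          = ((mN.choose (j + 1) : Nat) : Int) := by
        rw [hcast]
        have : ((j : Int) + 1) = ((j + 1 : Nat) : Int) := by push_cast; ring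
        rw [this, PySem.Int.floordiv_natCast]
        rw [Nat.mul_div_cancel _ (by omega)]
      rw [hc]
      have hpos : mN.choose (j + 1) ≠ 0 := by
        have := Nat.choose_pos (show j + 1 ≤ mN by omega); omega
      rw [if_neg (by exact_mod_cast hpos)]
      have hs : ((binomSum mN j : Nat) : Int) + ((mN.choose (j + 1) : Nat) : Int)
          = ((binomSum mN (j + 1) : Nat) : Int) := by
        rw [binomSum_succ]; push_cast; ring
      rw [hs]
      by_cases hstop : floors ≤ ((binomSum mN (j + 1) : Nat) : Int)
      · rw [if_pos hstop]
        have hmono : ((binomSum mN (j + 1) : Nat) : Int) ≤ ((binomSum mN (j + (fuel + 1)) : Nat) : Int) := by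
          exact_mod_cast binomSum_mono mN (by omega)
        constructor
        · intro _; omega
        · intro _; exact hstop
      · rw [if_neg hstop]
        have : (j : Int) + 1 + 1 = ((j + 1 : Nat) : Int) + 1 := by push_cast; ring
        rw [this, ih (j + 1)]
        have : j + 1 + fuel = j + (fuel + 1) := by omega
        rw [this]
    · -- mN ≤ j : the numerator is literally 0, c becomes 0, the loop stops
      have hnum : ((mN.choose j : Nat) : Int) * ((mN : Int) - (j : Int)) = 0 := by
        rcases Nat.lt_or_ge mN j with h' | h'
        · rw [Nat.choose_eq_zero_of_lt h']; simp
        · have : mN = j := by omega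
          subst this; simp
      rw [hnum]
      have hz : PySem.Int.floordiv 0 ((j : Int) + 1) = 0 := by
        rw [PySem.Int.floordiv_eq_ediv_of_pos (by omega)]; simp
      rw [hz, if_pos rfl]
      rw [binomSum_stable mN hj (show j ≤ j + (fuel + 1) by omega)]

theorem loops_eq (eggsN : Nat) (floors : Int) (hf : 1 ≤ floors) :
    ∀ (fuel t : Nat),
      lmLoop eggsN floors
        ((List.range (eggsN + 1)).map (fun j => min floors ((binomSum t j : Nat) : Int)))
        ((t : Int) + 1) fuel
      = lmAltLoop (eggsN : Int) floors ((t : Int) + 1) fuel := by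
  intro fuel
  induction fuel with
  | zero => intro t; simp [lmLoop, lmAltLoop]
  | succ fuel ih =>
    intro t
    simp only [lmLoop, lmAltLoop]
    have harr : lmInner floors
        ((List.range (eggsN + 1)).map (fun j => min floors ((binomSum t j : Nat) : Int))) eggsN
        = (List.range (eggsN + 1)).map (fun j => min floors ((binomSum (t + 1) j : Nat) : Int)) := by
      rw [← lmInner_arr floors hf t eggsN eggsN (le_refl _)]
      congr 1
      apply List.map_congr_left
      intro j hj
      rw [if_pos (by simp [List.mem_range] at hj; omega)]
    rw [harr]
    have hgd : (((List.range (eggsN + 1)).map (fun j => min floors ((binomSum (t + 1) j : Nat) : Int))).getD eggsN 0)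
        = min floors ((binomSum (t + 1) eggsN : Nat) : Int) := getD_map_range _ (by omega)
    rw [hgd]
    have hinner : lmAltInner ((t : Int) + 1) floors 1 0 1 ((eggsN : Int)).toNat
        = lmAltInner (((t + 1 : Nat) : Int)) floors (((t + 1 : Nat).choose 0 : Nat) : Int)
            ((binomSum (t + 1) 0 : Nat) : Int) (((0 : Nat) : Int) + 1) eggsN := by
      simp [binomSum_zero]
    rw [hinner]
    have hiff := lmAltInner_iff (t + 1) floors eggsN 0
    have hcond : (floors ≤ min floors ((binomSum (t + 1) eggsN : Nat) : Int))
        ↔ (floors ≤ lmAltInner (((t + 1 : Nat) : Int)) floors (((t + 1 : Nat).choose 0 : Nat) : Int)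
            ((binomSum (t + 1) 0 : Nat) : Int) (((0 : Nat) : Int) + 1) eggsN) := by
      rw [hiff]
      simp only [Nat.zero_add]
      omega
    by_cases hc : floors ≤ min floors ((binomSum (t + 1) eggsN : Nat) : Int)
    · rw [if_pos hc, if_pos (hcond.mp hc)]
    · rw [if_neg hc, if_neg (fun h => hc (hcond.mpr h))]
      have : (t : Int) + 1 + 1 = ((t + 1 : Nat) : Int) + 1 := by push_cast; ring
      rw [this]
      exact ih (t + 1)

theorem lm_eq (k n : Int) (hk : k ≠ 0) (h : ¬(k < 0 ∧ 0 < n)) :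
    least_moves k n = least_moves_alt k n := by
  unfold least_moves least_moves_alt
  by_cases hn : n ≤ 0
  · simp only [if_pos hn]
  · simp only [if_neg hn]
    have hkpos : 0 < k := by
      by_cases hkneg : k < 0
      · exact absurd ⟨hkneg, by omega⟩ h
      · omega
    have hkn : k = (k.toNat : Int) := (Int.toNat_of_nonneg (by omega)).symm
    have h1 : (k + 1).toNat = k.toNat + 1 := by omega
    rw [h1]
    have hrep : List.replicate (k.toNat + 1) (0 : Int)
        = (List.range (k.toNat + 1)).map (fun j => min n ((binomSum 0 j : Nat) : Int)) := by
      have hc : ∀ j ∈ List.range (k.toNat + 1),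
          min n ((binomSum 0 j : Nat) : Int) = (fun _ => (0 : Int)) j := by
        intro j _
        rw [binomSum_zero_left]
        simp
        omega
      rw [List.map_congr_left hc, List.map_const', List.length_range]
    rw [hrep]
    have hle := loops_eq k.toNat n (by omega) 63 0
    simp only [Nat.cast_zero, zero_add] at hle
    rw [hle, ← hkn]

theorem parse_acc (lines : List String) (qs : List (Int × Int)) :
    parseQueries lines qs = qs ++ parseQueries lines [] := by
  induction lines generalizing qs with
  | nil => simp [parseQueries]
  | cons line rest ih =>
    simp only [parseQueries]
    by_cases hE : PySem.Str.strip line = ""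
    · simp only [if_pos hE]
      exact ih qs
    · simp only [if_neg hE]
      generalize (PySem.Str.split₀ (PySem.Str.strip line)).map PySem.Int.ofStr? = ts
      rcases ts with _ | ⟨o1, ts⟩
      · simp
      rcases o1 with _ | k
      · simp
      rcases ts with _ | ⟨o2, ts⟩
      · simp
      rcases o2 with _ | n
      · simp
      rcases ts with _ | ⟨o3, ts⟩
      · by_cases hk0 : k = 0
        · simp [hk0]
        · simp only [hk0, ite_false]
          rw [ih (qs ++ [(k, n)]), List.nil_append, ih [(k, n)]]
          simp
      · simp

theorem solveLines_eq (lines : List String) (out : List String)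
    (h : preLines lines = true) :
    solveLines lines out = out ++ (parseQueries lines []).map renderAlt := by
  induction lines generalizing out with
  | nil => simp [solveLines, parseQueries]
  | cons line rest ih =>
    simp only [preLines] at h
    simp only [solveLines, parseQueries]
    by_cases hE : PySem.Str.strip line = ""
    · simp only [if_pos hE] at h ⊢
      exact ih out h
    · simp only [if_neg hE] at h ⊢
      generalize hts : (PySem.Str.split₀ (PySem.Str.strip line)).map PySem.Int.ofStr? = ts at h ⊢
      rcases ts with _ | ⟨o1, ts⟩
      · simp at h
      rcases o1 with _ | k
      · simp at h
      rcases ts with _ | ⟨o2, ts⟩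
      · simp at h
      rcases o2 with _ | n
      · simp at h
      rcases ts with _ | ⟨o3, ts⟩
      · -- exactly two int tokens
        by_cases hk0 : k = 0
        · simp [hk0]
        · simp only [hk0, ite_false] at h ⊢
          rw [Bool.and_eq_true] at h
          obtain ⟨h1, h2⟩ := h
          have hadm : ¬(k < 0 ∧ 0 < n) := of_decide_eq_true h1
          rw [lm_eq k n hk0 hadm]
          cases hlm : least_moves_alt k n with
          | none =>
            have hih := ih (out ++ [LIMIT_MSG]) h2
            simp [hih, parse_acc rest [(k, n)], renderAlt, hlm]
          | some a =>
            have hih := ih (out ++ [PySem.Int.toStr a]) h2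
            simp [hih, parse_acc rest [(k, n)], renderAlt, hlm]
      · simp at h

-- ===== VERDICT (by name: the statement is the Claim_ definition above) =====
theorem solve_spec : Claim_equal_solve := by
  intro raw _ hpre
  unfold Pre_solve pvLines at hpre
  unfold Spec_solve solve solve_alt
  rw [solveLines_eq _ _ (pre_bridge _ hpre), List.nil_append]
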